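-- pv_equiv track=rewrite | github.com/pythorena/python-lists-loops-programming-exercises | exercises/15.2-Parking_lot_check/app.py | get_parking_lot
-- ===== SOURCE A (Python) =====
-- def get_parking_lot(matriz):
--     state={'total':0,'disponibles':0,'ocupados':0}
--     for i in range(len(matriz)):
--         for j in range(len(matriz)):
--           if matriz[i][j]==1:
--             state['ocupados']+=1
--             state['total']+=1
--           elif matriz[i][j]==2:
--              state['disponibles']+=1
--              state['total']+=1
--     return state
-- ===== SOURCE B (Python) =====
-- def _bisect_right(a, x):
--     lo, hi = 0, len(a)
--     while lo < hi:
--         mid = (lo + hi) // 2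
--         if x < a[mid]:
--             hi = mid
--         else:
--             lo = mid + 1
--     return lo
--
--
-- def get_parking_lot(matriz):
--     n = len(matriz)
--     cells = sorted(matriz[i][j] for i in range(n) for j in range(n))
--     ocupados = _bisect_right(cells, 1) - _bisect_right(cells, 0)
--     disponibles = _bisect_right(cells, 2) - _bisect_right(cells, 1)
--     return {'total': ocupados + disponibles,
--             'disponibles': disponibles,
--             'ocupados': ocupados}
-- ===== Notes on version B (the rewrite author's own statement) =====
-- stated objective: alternative
-- what changed: Instead of branching per cell and incrementing a mutable state dict, B sorts the flattened cells and obtains each count as a difference of two hand-written binary-search (bisect_right) positions in the sorted list.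
import Mathlib
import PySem

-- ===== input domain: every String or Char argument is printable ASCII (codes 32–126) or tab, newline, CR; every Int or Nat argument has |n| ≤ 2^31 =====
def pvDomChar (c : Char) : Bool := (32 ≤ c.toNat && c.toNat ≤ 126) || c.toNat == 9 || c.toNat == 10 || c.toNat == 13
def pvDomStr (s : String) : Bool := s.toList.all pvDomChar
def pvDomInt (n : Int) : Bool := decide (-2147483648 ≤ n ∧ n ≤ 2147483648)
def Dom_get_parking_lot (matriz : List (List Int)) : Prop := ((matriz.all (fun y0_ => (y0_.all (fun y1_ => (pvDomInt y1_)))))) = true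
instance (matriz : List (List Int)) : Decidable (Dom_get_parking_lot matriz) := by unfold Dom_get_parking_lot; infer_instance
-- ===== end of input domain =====

-- B replaces A's per-cell if/elif updates of a mutable state dict by a different algorithm:
-- sort the flattened cells, then read each count off as a difference of two hand-written
-- binary-search (bisect_right) positions (alternative, not faster).

-- ===== PORT A =====
def get_parking_lot (matriz : List (List Int)) : List (String × Int) :=
  let state : PySem.Dict String Int := PySem.Dict.mk [("total", 0), ("disponibles", 0), ("ocupados", 0)]
  let n : Int := matriz.length
  (PySem.List.pyRange 0 n 1).foldl (fun st i =>
    (PySem.List.pyRange 0 n 1).foldl (fun st j =>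
      -- matriz[i][j]: Pre_ guarantees both indices are in range, so the defaults are never taken
      let v := PySem.List.pyGetD (PySem.List.pyGetD matriz i []) j 0
      if v == 1 then
        let st := PySem.Dict.insert st "ocupados" (PySem.Dict.getD st "ocupados" 0 + 1)
        PySem.Dict.insert st "total" (PySem.Dict.getD st "total" 0 + 1)
      else if v == 2 then
        let st := PySem.Dict.insert st "disponibles" (PySem.Dict.getD st "disponibles" 0 + 1)
        PySem.Dict.insert st "total" (PySem.Dict.getD st "total" 0 + 1)
      else st) st) state |>.items

-- ===== PORT B =====
-- Source B's hand-written _bisect_right while-loop; a[mid] is always in range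
-- (0 ≤ lo ≤ mid < hi ≤ len a), so the pyGetD default is never taken.
def pvBisectLoop (a : List Int) (x : Int) (lo hi : Int) : Int :=
  if hlt : lo < hi then
    let mid := PySem.Int.floordiv (lo + hi) 2
    if x < PySem.List.pyGetD a mid 0 then pvBisectLoop a x lo mid
    else pvBisectLoop a x (mid + 1) hi
  else lo
termination_by (hi - lo).toNat
decreasing_by
  · have h2 : PySem.Int.floordiv (lo + hi) 2 < hi := by
      rw [PySem.Int.floordiv_lt_iff_lt_mul (by norm_num)]; omega
    omega
  · have h1 : lo ≤ PySem.Int.floordiv (lo + hi) 2 := (PySem.Int.floordiv_two_mid_bounds (le_of_lt hlt)).1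
    have h2 : PySem.Int.floordiv (lo + hi) 2 < hi := by
      rw [PySem.Int.floordiv_lt_iff_lt_mul (by norm_num)]; omega
    omega

def pvBisectRight (a : List Int) (x : Int) : Int :=
  pvBisectLoop a x 0 a.length

def get_parking_lot_alt (matriz : List (List Int)) : List (String × Int) :=
  let n : Int := matriz.length
  let cells := PySem.List.sorted ((PySem.List.pyRange 0 n 1).flatMap (fun i =>
    (PySem.List.pyRange 0 n 1).map (fun j =>
      PySem.List.pyGetD (PySem.List.pyGetD matriz i []) j 0))) (fun v => v) false
  let ocupados := pvBisectRight cells 1 - pvBisectRight cells 0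
  let disponibles := pvBisectRight cells 2 - pvBisectRight cells 1
  [("total", ocupados + disponibles),
   ("disponibles", disponibles),
   ("ocupados", ocupados)]

-- ===== PRECONDITION & SPEC =====
-- Pre_ excludes ragged matrices (some row shorter than len(matriz)), on which both Pythons raise IndexError.
def Pre_get_parking_lot (matriz : List (List Int)) : Prop :=
  (matriz.all (fun row => matriz.length ≤ row.length)) = true
instance (matriz : List (List Int)) : Decidable (Pre_get_parking_lot matriz) := by unfold Pre_get_parking_lot; infer_instance
def pvWitness_get_parking_lot : List (List Int) := [[1, 2], [0, 1]]
def Spec_get_parking_lot (matriz : List (List Int)) (out : List (String × Int)) : Prop := out = get_parking_lot_alt matriz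
instance (matriz : List (List Int)) (out : List (String × Int)) : Decidable (Spec_get_parking_lot matriz out) := by unfold Spec_get_parking_lot; infer_instance

-- ===== CLAIM (what is proved, stated in full; the proofs are below) =====
def Claim_equal_get_parking_lot : Prop := ∀ (matriz : List (List Int)), Dom_get_parking_lot matriz → Pre_get_parking_lot matriz → Spec_get_parking_lot matriz (get_parking_lot matriz)

-- ===== LEMMAS AND PROOFS =====

-- A's loop body as a function of the already-fetched cell value.
def pvStepA (st : PySem.Dict String Int) (v : Int) : PySem.Dict String Int :=
  if v == 1 then
    let st := PySem.Dict.insert st "ocupados" (PySem.Dict.getD st "ocupados" 0 + 1)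
    PySem.Dict.insert st "total" (PySem.Dict.getD st "total" 0 + 1)
  else if v == 2 then
    let st := PySem.Dict.insert st "disponibles" (PySem.Dict.getD st "disponibles" 0 + 1)
    PySem.Dict.insert st "total" (PySem.Dict.getD st "total" 0 + 1)
  else st

-- Nested fold over g-blocks is the fold over the flattened list.
theorem foldl_foldl_eq_foldl_flatMap {α β γ : Type} (l : List α) (g : α → List β)
    (f : γ → β → γ) (init : γ) :
    l.foldl (fun acc x => (g x).foldl f acc) init = (l.flatMap g).foldl f init := by
  induction l generalizing init with
  | nil => rfl
  | cons x xs ih => simp [List.flatMap_cons, List.foldl_append, ih]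

-- Invariant of A's loop: the state dict keeps its three keys in place and accumulates the two counts.
theorem foldA_counts (L : List Int) (t d o : Int) :
    L.foldl pvStepA (PySem.Dict.mk [("total", t), ("disponibles", d), ("ocupados", o)]) =
      PySem.Dict.mk
        [("total", t + (L.count 1 : Int) + (L.count 2 : Int)),
         ("disponibles", d + (L.count 2 : Int)),
         ("ocupados", o + (L.count 1 : Int))] := by
  induction L generalizing t d o with
  | nil => simp
  | cons x xs ih =>
    by_cases h1 : x = 1
    · subst h1
      have hstep : pvStepA (PySem.Dict.mk [("total", t), ("disponibles", d), ("ocupados", o)]) 1 =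
          PySem.Dict.mk [("total", t + 1), ("disponibles", d), ("ocupados", o + 1)] := by
        simp [pvStepA, PySem.Dict.insert, PySem.Dict.getD, PySem.Dict.get?, PySem.Dict.contains]
      rw [List.foldl_cons, hstep, ih]
      simp
      constructor <;> ring
    · by_cases h2 : x = 2
      · subst h2
        have hstep : pvStepA (PySem.Dict.mk [("total", t), ("disponibles", d), ("ocupados", o)]) 2 =
            PySem.Dict.mk [("total", t + 1), ("disponibles", d + 1), ("ocupados", o)] := by
          simp [pvStepA, PySem.Dict.insert, PySem.Dict.getD, PySem.Dict.get?, PySem.Dict.contains]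
        rw [List.foldl_cons, hstep, ih]
        simp
        constructor <;> ring
      · have hstep : pvStepA (PySem.Dict.mk [("total", t), ("disponibles", d), ("ocupados", o)]) x =
            PySem.Dict.mk [("total", t), ("disponibles", d), ("ocupados", o)] := by
          simp [pvStepA, h1, h2]
        rw [List.foldl_cons, hstep, ih]
        simp [h1, h2]

-- If the first k elements satisfy p and the rest do not, countP p = k.
theorem countP_eq_of_cut (l : List Int) (p : Int → Bool) (k : Nat) (hk : k ≤ l.length)
    (hlo : ∀ i : Nat, (h : i < l.length) → i < k → p l[i])
    (hhi : ∀ i : Nat, (h : i < l.length) → k ≤ i → ¬ p l[i]) :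
    l.countP p = k := by
  have hsplit : l = l.take k ++ l.drop k := (List.take_append_drop k l).symm
  rw [List.countP_eq_length_filter, hsplit, List.filter_append]
  have h1 : (l.take k).filter p = l.take k := by
    rw [List.filter_eq_self]
    intro x hx
    rw [List.mem_iff_getElem] at hx
    obtain ⟨i, hi, rfl⟩ := hx
    rw [List.getElem_take]
    exact hlo i (by simp at hi; omega) (by simp at hi; omega)
  have h2 : (l.drop k).filter p = [] := by
    rw [List.filter_eq_nil_iff]
    intro x hx
    rw [List.mem_iff_getElem] at hx
    obtain ⟨i, hi, rfl⟩ := hx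
    rw [List.getElem_drop]
    exact hhi (k + i) (by simp at hi; omega) (by omega)
  rw [h1, h2]
  simp [hk]

-- The binary-search loop on a sorted list computes the count of elements ≤ x.
theorem pvBisectLoop_eq_countP (a : List Int) (x : Int)
    (hsorted : a.Pairwise (· ≤ ·)) :
    ∀ (lo hi : Int), 0 ≤ lo → lo ≤ hi → hi ≤ a.length →
      (∀ i : Nat, (h : i < a.length) → (i : Int) < lo → a[i] ≤ x) →
      (∀ i : Nat, (h : i < a.length) → hi ≤ (i : Int) → x < a[i]) →
      pvBisectLoop a x lo hi = (a.countP (fun v => v ≤ x) : Int) := by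
  intro lo hi
  induction lo, hi using pvBisectLoop.induct a x with
  | case1 lo hi hlt mid hx ih =>
    intro hlo0 _ hhile hlo hhi
    have hmid1 : lo ≤ mid := (PySem.Int.floordiv_two_mid_bounds (le_of_lt hlt)).1
    have hmid2 : mid < hi := by
      rw [show mid = PySem.Int.floordiv (lo + hi) 2 from rfl,
        PySem.Int.floordiv_lt_iff_lt_mul (by norm_num)]; omega
    have hmidrange : mid.toNat < a.length := by omega
    have hget : PySem.List.pyGetD a mid 0 = a[mid.toNat] := by
      conv_lhs => rw [show mid = ((mid.toNat : Nat) : Int) from by omega]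
      rw [PySem.List.pyGetD_natCast, List.getD_eq_getElem?_getD,
        List.getElem?_eq_getElem hmidrange]
      rfl
    have hx' : x < PySem.List.pyGetD a (PySem.Int.floordiv (lo + hi) 2) 0 := hx
    rw [pvBisectLoop, dif_pos hlt, if_pos hx']
    apply ih hlo0 (by omega) (by omega) hlo
    intro i hi' hmi
    rw [hget] at hx
    rcases eq_or_lt_of_le (show mid.toNat ≤ i by omega) with heq | hlt'
    · subst heq; exact hx
    · exact lt_of_lt_of_le hx ((List.pairwise_iff_getElem.mp hsorted) _ _ _ _ hlt')
  | case2 lo hi hlt mid hx ih =>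
    intro hlo0 _ hhile hlo hhi
    have hmid1 : lo ≤ mid := (PySem.Int.floordiv_two_mid_bounds (le_of_lt hlt)).1
    have hmid2 : mid < hi := by
      rw [show mid = PySem.Int.floordiv (lo + hi) 2 from rfl,
        PySem.Int.floordiv_lt_iff_lt_mul (by norm_num)]; omega
    have hmidrange : mid.toNat < a.length := by omega
    have hget : PySem.List.pyGetD a mid 0 = a[mid.toNat] := by
      conv_lhs => rw [show mid = ((mid.toNat : Nat) : Int) from by omega]
      rw [PySem.List.pyGetD_natCast, List.getD_eq_getElem?_getD,
        List.getElem?_eq_getElem hmidrange]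
      rfl
    have hxle : a[mid.toNat] ≤ x := by rw [← hget]; exact not_lt.mp hx
    have hx' : ¬ x < PySem.List.pyGetD a (PySem.Int.floordiv (lo + hi) 2) 0 := hx
    rw [pvBisectLoop, dif_pos hlt, if_neg hx']
    apply ih (by omega) (by omega) hhile _ hhi
    intro i hi' hmi
    rcases eq_or_lt_of_le (show i ≤ mid.toNat by omega) with heq | hlt'
    · subst heq; exact hxle
    · exact le_trans ((List.pairwise_iff_getElem.mp hsorted) _ _ _ _ hlt') hxle
  | case3 lo hi hnlt =>
    intro hlo0 hlole hhile hlo hhi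
    have hlohi : lo = hi := by omega
    rw [pvBisectLoop, dif_neg hnlt]
    rw [countP_eq_of_cut a _ lo.toNat (by omega)
      (fun i h hik => decide_eq_true (hlo i h (by omega)))
      (fun i h hik => by simp; exact hhi i h (by omega))]
    omega

theorem pvBisectRight_eq_countP (a : List Int) (x : Int)
    (hsorted : a.Pairwise (· ≤ ·)) :
    pvBisectRight a x = (a.countP (fun v => v ≤ x) : Int) := by
  unfold pvBisectRight
  exact pvBisectLoop_eq_countP a x hsorted 0 a.length (le_refl 0)
    (by omega) (le_refl _)
    (fun i h hik => absurd hik (by omega))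
    (fun i h hik => absurd hik (by omega))

-- countP (· ≤ k) splits as countP (· ≤ k-1) plus the number of copies of k.
theorem countP_le_split (l : List Int) (k : Int) :
    l.countP (fun v => v ≤ k) = l.countP (fun v => v ≤ k - 1) + l.count k := by
  induction l with
  | nil => rfl
  | cons v t ih =>
    simp only [List.countP_cons, List.count_cons, ih, decide_eq_true_eq, beq_iff_eq]
    split_ifs <;> omega

-- ===== VERDICT (by name: the statement is the Claim_ definition above) =====
theorem get_parking_lot_spec : Claim_equal_get_parking_lot := by
  intro matriz _ _
  show get_parking_lot matriz = get_parking_lot_alt matriz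
  unfold get_parking_lot get_parking_lot_alt
  set flat := (PySem.List.pyRange 0 (matriz.length : Int) 1).flatMap (fun i =>
    (PySem.List.pyRange 0 (matriz.length : Int) 1).map (fun j =>
      PySem.List.pyGetD (PySem.List.pyGetD matriz i []) j 0)) with hflat
  show ((PySem.List.pyRange 0 (matriz.length : Int) 1).foldl (fun st i =>
      (PySem.List.pyRange 0 (matriz.length : Int) 1).foldl (fun st j =>
        pvStepA st (PySem.List.pyGetD (PySem.List.pyGetD matriz i []) j 0)) st)
      (PySem.Dict.mk [("total", 0), ("disponibles", 0), ("ocupados", 0)])).items = _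
  have houter : (fun (st : PySem.Dict String Int) (i : Int) =>
      (PySem.List.pyRange 0 (matriz.length : Int) 1).foldl (fun st j =>
        pvStepA st (PySem.List.pyGetD (PySem.List.pyGetD matriz i []) j 0)) st) =
      (fun st i => ((PySem.List.pyRange 0 (matriz.length : Int) 1).map (fun j =>
        PySem.List.pyGetD (PySem.List.pyGetD matriz i []) j 0)).foldl pvStepA st) :=
    funext fun st => funext fun i => List.foldl_map.symm
  rw [houter, foldl_foldl_eq_foldl_flatMap, ← hflat, foldA_counts]
  -- B side: express the bisect differences as counts over flat
  let cells := PySem.List.sorted flat (fun v => v) false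
  have hpw : cells.Pairwise (· ≤ ·) := PySem.List.sorted_pairwise flat (fun v => v)
  have hperm : cells.Perm flat := PySem.List.sorted_perm flat (fun v => v) false
  have hb : ∀ x : Int, pvBisectRight cells x = (flat.countP (fun v => v ≤ x) : Int) := by
    intro x
    rw [pvBisectRight_eq_countP cells x hpw, hperm.countP_eq]
  have h1 : pvBisectRight cells 1 - pvBisectRight cells 0 = (flat.count 1 : Int) := by
    rw [hb, hb]
    have := countP_le_split flat 1
    norm_num at this
    omega
  have h2 : pvBisectRight cells 2 - pvBisectRight cells 1 = (flat.count 2 : Int) := by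
    rw [hb, hb]
    have := countP_le_split flat 2
    norm_num at this
    omega
  show (PySem.Dict.mk
      [("total", 0 + (flat.count 1 : Int) + (flat.count 2 : Int)),
       ("disponibles", 0 + (flat.count 2 : Int)),
       ("ocupados", 0 + (flat.count 1 : Int))]).items =
    [("total", pvBisectRight cells 1 - pvBisectRight cells 0 +
        (pvBisectRight cells 2 - pvBisectRight cells 1)),
     ("disponibles", pvBisectRight cells 2 - pvBisectRight cells 1),
     ("ocupados", pvBisectRight cells 1 - pvBisectRight cells 0)]
  rw [h1, h2]
  norm_num [PySem.Dict.items, PySem.Dict.mk]
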